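-- pv_equiv track=rewrite | github.com/filipesuhett/studying | Python/Prog-2/05. Maratona de Programação/Maratona em Python/16_fase.py | fase1
-- ===== SOURCE A (Python) =====
-- def fase1(l):
--     cont = 0
--     passaram = 0
--
--     y = l[1]
--     l.pop(0)
--     l.pop(0)
--     l.sort()
--     l.reverse()
--
--     while cont < len(l):
--         if passaram < y:
--             passaram += 1
--             if passaram == y:
--                 aux = l[cont]
--         elif aux == l[cont]:
--             passaram += 1
--         else:
--             return passaram
--         cont += 1
--     return passaram
-- ===== SOURCE B (Python) =====
-- def _kth_largest(xs, k):
--     # iterative quickselect (middle pivot): value with k-th largest rank (1-indexed)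
--     while True:
--         p = xs[len(xs) // 2]
--         g = [v for v in xs if v > p]
--         if k <= len(g):
--             xs = g
--             continue
--         e = 0
--         for v in xs:
--             if v == p:
--                 e += 1
--         if k <= len(g) + e:
--             return p
--         k -= len(g) + e
--         xs = [v for v in xs if v < p]
--
-- def fase1(l):
--     y = l[1]
--     rest = l[2:]
--     n = len(rest)
--     if y >= n:
--         return n
--     t = _kth_largest(rest, y)
--     c = 0
--     for v in rest:
--         if v >= t:
--             c += 1
--     return c
-- ===== Notes on version B (the rewrite author's own statement) =====
-- stated objective: faster
-- what changed: B replaces A's full sort plus sequential state-machine scan by an iterative quickselect (middle pivot) that finds the y-th largest value, followed by one counting pass over the unsorted tail; B does not mutate l (A pops/sorts it in place).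
-- outside the precondition, e.g. on fase1([1]): A raises IndexError, B raises IndexError; on fase1([5, -1]): A returns 0, B raises IndexError; on fase1([5, 0]): A returns 0, B returns 0
import Mathlib
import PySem

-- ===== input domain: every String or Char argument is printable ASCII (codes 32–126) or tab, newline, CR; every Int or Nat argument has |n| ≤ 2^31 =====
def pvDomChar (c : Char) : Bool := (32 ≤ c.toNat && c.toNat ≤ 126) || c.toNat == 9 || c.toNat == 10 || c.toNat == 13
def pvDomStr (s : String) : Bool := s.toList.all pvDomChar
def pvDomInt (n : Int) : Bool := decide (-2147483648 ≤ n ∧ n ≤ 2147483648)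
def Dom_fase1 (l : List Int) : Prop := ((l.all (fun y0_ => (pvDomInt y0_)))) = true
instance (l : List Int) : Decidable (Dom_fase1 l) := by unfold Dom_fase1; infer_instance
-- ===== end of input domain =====

-- B replaces A's full sort + sequential scan by quickselect of the y-th largest value plus one
-- counting pass; equivalence is about the RETURN value only (A mutates l in place, B does not).

-- ===== PORT A =====
-- A's while loop: cont/passaram/aux exactly as in the Python (aux unset = none).
def fase1Loop (s : List Int) (y : Int) (cont : Nat) (passaram : Int) (aux : Option Int) : Int :=
  if h : cont < s.length then
    if passaram < y then
      if passaram + 1 = y then fase1Loop s y (cont + 1) (passaram + 1) (some s[cont])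
      else fase1Loop s y (cont + 1) (passaram + 1) aux
    else if aux = some s[cont] then fase1Loop s y (cont + 1) (passaram + 1) aux
    else passaram
  else passaram
termination_by s.length - cont

def fase1 (l : List Int) : Int :=
  let y := PySem.List.pyGetD l 1 0      -- y = l[1]  (Pre_ guarantees the index is in range)
  let l1 := l.drop 1                    -- l.pop(0)
  let l2 := l1.drop 1                   -- l.pop(0)
  let s := (PySem.List.sorted l2 (fun x => x) false).reverse   -- l.sort(); l.reverse()
  fase1Loop s y 0 0 none

-- ===== PORT B =====
-- the e-counting loop of Source B's quickselect
def countEq (p : Int) (xs : List Int) : Int :=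
  xs.foldl (fun acc v => if v = p then acc + 1 else acc) 0

-- iterative quickselect (middle pivot) from Source B; the [] branch is unreachable under Pre_
-- (the Python would raise IndexError there).
def kthLargest (xs : List Int) (k : Int) : Int :=
  if hne : xs = [] then 0
  else
    let p := xs.getD (xs.length / 2) 0
    let g := xs.filter (fun v => p < v)
    if k ≤ (g.length : Int) then kthLargest g k
    else
      let e := countEq p xs
      if k ≤ (g.length : Int) + e then p
      else kthLargest (xs.filter (fun v => v < p)) (k - (g.length : Int) - e)
termination_by xs.length
decreasing_by
  all_goals
    have hl : xs.length / 2 < xs.length := by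
      have : xs.length ≠ 0 := fun h => hne (List.eq_nil_of_length_eq_zero h)
      omega
    have hp : xs.getD (xs.length / 2) 0 ∈ xs := by
      rw [List.getD_eq_getElem xs 0 hl]; exact List.getElem_mem hl
  all_goals
    simp only [List.length_unattach]
    refine lt_of_lt_of_le
      (List.length_filter_lt_length_iff_exists.2 ⟨⟨_, hp⟩, List.mem_attach _ _, ?_⟩)
      (le_of_eq (List.length_attach (l := xs)))
    simp

def fase1_alt (l : List Int) : Int :=
  let y := PySem.List.pyGetD l 1 0
  let rest := l.drop 2
  let n := (rest.length : Int)
  if n ≤ y then n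
  else
    let t := kthLargest rest y
    rest.foldl (fun c v => if t ≤ v then c + 1 else c) (0 : Int)

-- ===== PRECONDITION & SPEC =====
-- Pre_ excludes lists with fewer than two elements (A raises IndexError) and those with a
-- non-positive y = l[1]: A raises UnboundLocalError on them whenever contestants remain,
-- and B's quickselect likewise raises on the remaining degenerate ones.
def Pre_fase1 (l : List Int) : Prop := 2 ≤ l.length ∧ 1 ≤ l.getD 1 0
instance (l : List Int) : Decidable (Pre_fase1 l) := by unfold Pre_fase1; infer_instance
def pvWitness_fase1 : List Int := [3, 2, 5, 1, 4]

def Spec_fase1 (l : List Int) (out : Int) : Prop := out = fase1_alt l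
instance (l : List Int) (out : Int) : Decidable (Spec_fase1 l out) := by unfold Spec_fase1; infer_instance

-- ===== CLAIM (what is proved, stated in full; the proofs are below) =====
def Claim_equal_fase1 : Prop := ∀ (l : List Int), Dom_fase1 l → Pre_fase1 l → Spec_fase1 l (fase1 l)

-- ===== LEMMAS AND PROOFS =====

-- counts of elements ≥ t / > t (everything is compared through these)
def cge (t : Int) (xs : List Int) : Nat := xs.countP (fun v => decide (t ≤ v))
def cgt (t : Int) (xs : List Int) : Nat := xs.countP (fun v => decide (t < v))

theorem foldl_count_pred (p : Int → Prop) [DecidablePred p] (xs : List Int) (c : Int) :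
    xs.foldl (fun acc v => if p v then acc + 1 else acc) c
      = c + (xs.countP (fun v => decide (p v)) : Int) := by
  induction xs generalizing c with
  | nil => simp
  | cons a tl ih =>
    by_cases h : p a <;> simp [List.foldl_cons, List.countP_cons, h, ih] <;> ring

theorem countP_split3 (xs : List Int) (q : Int → Bool) (p : Int) :
    xs.countP q
      = xs.countP (fun v => q v && decide (p < v))
        + xs.countP (fun v => q v && decide (v = p))
        + xs.countP (fun v => q v && decide (v < p)) := by
  induction xs with
  | nil => simp
  | cons a tl ih =>
    simp only [List.countP_cons, ih]
    rcases lt_trichotomy p a with h | h | h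
    · by_cases hq : q a <;> simp [hq, h, h.ne', not_lt_of_gt h] <;> omega
    · by_cases hq : q a <;> simp [hq, ← h] <;> omega
    · by_cases hq : q a <;> simp [hq, h, h.ne, not_lt_of_gt h] <;> omega

-- countP helpers for the quickselect proof
theorem countP_and_of_imp (xs : List Int) (q r : Int → Bool)
    (h : ∀ a, q a = true → r a = true) :
    xs.countP (fun v => q v && r v) = xs.countP q := by
  induction xs with
  | nil => rfl
  | cons a tl ih =>
    by_cases hq : q a = true
    · simp [List.countP_cons, hq, h a hq, ih]
    · simp [List.countP_cons, Bool.eq_false_iff.2 hq, ih]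

theorem countP_and_of_imp' (xs : List Int) (q r : Int → Bool)
    (h : ∀ a, r a = true → q a = true) :
    xs.countP (fun v => q v && r v) = xs.countP r := by
  rw [List.countP_congr (fun a _ => by rw [Bool.and_comm])]
  exact countP_and_of_imp xs r q h

theorem countP_and_zero (xs : List Int) (q r : Int → Bool)
    (h : ∀ a, q a = true → r a = false) :
    xs.countP (fun v => q v && r v) = 0 := by
  refine List.countP_eq_zero.2 (fun a ha hp => ?_)
  rcases Bool.and_eq_true_iff.1 hp with ⟨h1, h2⟩
  rw [h a h1] at h2
  exact Bool.false_ne_true h2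

-- quickselect spec: its result t has cgt t xs < k ≤ cge t xs, and t ∈ xs
theorem kthLargest_spec (xs : List Int) (k : Int)
    (h1 : 1 ≤ k) (h2 : k ≤ (xs.length : Int)) :
    (cgt (kthLargest xs k) xs : Int) < k ∧ k ≤ (cge (kthLargest xs k) xs : Int)
      ∧ kthLargest xs k ∈ xs := by
  fun_induction kthLargest xs k with
  | case1 => simp at h2; omega
  | case2 =>
    rename_i xs k hne p g hcond ih
    simp only [g, p, List.unattach_filter, List.unattach_attach, List.length_unattach]
      at hcond ih
    simp only [g, p, hcond, if_true, reduceIte]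
    set p' := xs.getD (xs.length / 2) 0 with hp'
    set g' := List.filter (fun x => decide (p' < x)) xs with hg'
    obtain ⟨igt, ige, imem⟩ := ih h1 hcond
    set t := kthLargest g' k with ht
    have hpt : p' < t := by
      have := List.of_mem_filter imem
      simpa using this
    have egt : cgt t xs = cgt t g' := by
      unfold cgt
      rw [hg', List.countP_filter]
      exact (countP_and_of_imp xs (fun v => decide (t < v)) (fun v => decide (p' < v))
        (fun a ha => by simp at ha ⊢; omega)).symm
    have ege : cge t xs = cge t g' := by
      unfold cge
      rw [hg', List.countP_filter]
      exact (countP_and_of_imp xs (fun v => decide (t ≤ v)) (fun v => decide (p' < v))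
        (fun a ha => by simp at ha ⊢; omega)).symm
    exact ⟨by rw [egt]; exact igt, by rw [ege]; exact ige, List.mem_of_mem_filter imem⟩
  | case3 =>
    rename_i xs k hne p g hcond e hcond2
    simp only [g, p, e, List.unattach_filter, List.unattach_attach, List.length_unattach]
      at hcond hcond2
    simp only [g, p, e, List.unattach_filter, List.unattach_attach, List.length_unattach,
      hcond, hcond2, if_true, if_false, reduceIte]
    set p' := xs.getD (xs.length / 2) 0 with hp'
    simp only [← hp'] at hcond hcond2
    have hmem : p' ∈ xs := by
      have hl : xs.length / 2 < xs.length := by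
        have : xs.length ≠ 0 := fun h => hne (List.eq_nil_of_length_eq_zero h)
        omega
      rw [hp', List.getD_eq_getElem xs 0 hl]
      exact List.getElem_mem hl
    have hfe : countEq p' xs = 0 + (xs.countP (fun v => decide (v = p')) : Int) :=
      foldl_count_pred (fun v => v = p') xs 0
    have hgl : (List.filter (fun x => decide (p' < x)) xs).length
        = xs.countP (fun v => decide (p' < v)) :=
      List.countP_eq_length_filter.symm
    have hgt : cgt p' xs = xs.countP (fun v => decide (p' < v)) := rfl
    have hge : cge p' xs
        = xs.countP (fun v => decide (p' < v)) + xs.countP (fun v => decide (v = p')) := by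
      unfold cge
      rw [countP_split3 xs (fun v => decide (p' ≤ v)) p']
      rw [countP_and_of_imp' xs _ _ (fun a ha => by simp at ha ⊢; omega)]
      rw [countP_and_of_imp' xs _ _ (fun a ha => by simp at ha ⊢; omega)]
      rw [countP_and_zero xs _ _ (fun a ha => by simp at ha ⊢; omega)]
      omega
    rw [hfe] at hcond2
    rw [hgl] at hcond hcond2
    refine ⟨?_, ?_, hmem⟩
    · rw [hgt]; omega
    · rw [hge]; push_cast; push_cast at hcond2; omega
  | case4 =>
    rename_i xs k hne p g hcond e hcond2 ih
    simp only [g, p, e, List.unattach_filter, List.unattach_attach, List.length_unattach]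
      at hcond hcond2 ih
    simp only [g, p, e, List.unattach_filter, List.unattach_attach, List.length_unattach,
      hcond, hcond2, if_true, if_false, reduceIte]
    set p' := xs.getD (xs.length / 2) 0 with hp'
    simp only [← hp'] at hcond hcond2 ih
    have hun : (List.filter (fun x : {v // v ∈ xs} => decide ((x : Int) < p')) xs.attach).unattach
        = List.filter (fun v => decide (v < p')) xs := by
      rw [List.unattach_filter (g := fun v => decide (v < p')) (hf := fun x h => rfl),
        List.unattach_attach]
    have hlen := congrArg List.length hun
    rw [List.length_unattach] at hlen
    rw [hun, hlen] at ih
    set g' := List.filter (fun x => decide (p' < x)) xs with hg'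
    set l' := List.filter (fun v => decide (v < p')) xs with hl'
    have hfe : countEq p' xs = 0 + (xs.countP (fun v => decide (v = p')) : Int) :=
      foldl_count_pred (fun v => v = p') xs 0
    have hgl : g'.length = xs.countP (fun v => decide (p' < v)) := by
      rw [hg']; exact List.countP_eq_length_filter.symm
    have hll : l'.length = xs.countP (fun v => decide (v < p')) := by
      rw [hl']; exact List.countP_eq_length_filter.symm
    have hsplit : xs.length
        = xs.countP (fun v => decide (p' < v)) + xs.countP (fun v => decide (v = p'))
          + xs.countP (fun v => decide (v < p')) := by
      have h3 := countP_split3 xs (fun _ => true) p'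
      simp only [Bool.true_and, List.countP_true] at h3
      exact h3
    have h1' : 1 ≤ k - (g'.length : Int) - countEq p' xs := by
      push_cast at hcond2 ⊢; omega
    have h2' : k - (g'.length : Int) - countEq p' xs ≤ (l'.length : Int) := by
      rw [hfe]; push_cast [hgl, hll]; push_cast at h2; omega
    obtain ⟨igt, ige, imem⟩ := ih h1' h2'
    set t := kthLargest l' (k - (g'.length : Int) - countEq p' xs) with htdef
    have htp : t < p' := by
      have := List.of_mem_filter imem
      simpa using this
    have egt : cgt t xs
        = xs.countP (fun v => decide (p' < v)) + xs.countP (fun v => decide (v = p'))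
          + cgt t l' := by
      unfold cgt
      rw [countP_split3 xs (fun v => decide (t < v)) p']
      rw [countP_and_of_imp' xs _ _ (fun a ha => by simp at ha ⊢; omega)]
      rw [countP_and_of_imp' xs _ _ (fun a ha => by simp at ha ⊢; omega)]
      rw [show xs.countP (fun v => decide (t < v) && decide (v < p'))
          = List.countP (fun v => decide (t < v)) l' from by
        rw [hl']; exact List.countP_filter.symm]
    have ege : cge t xs
        = xs.countP (fun v => decide (p' < v)) + xs.countP (fun v => decide (v = p'))
          + cge t l' := by
      unfold cge
      rw [countP_split3 xs (fun v => decide (t ≤ v)) p']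
      rw [countP_and_of_imp' xs _ _ (fun a ha => by simp at ha ⊢; omega)]
      rw [countP_and_of_imp' xs _ _ (fun a ha => by simp at ha ⊢; omega)]
      rw [show xs.countP (fun v => decide (t ≤ v) && decide (v < p'))
          = List.countP (fun v => decide (t ≤ v)) l' from by
        rw [hl']; exact List.countP_filter.symm]
    rw [hl'] at imem
    refine ⟨?_, ?_, List.mem_of_mem_filter imem⟩
    · rw [egt]; push_cast [hgl, hfe] at igt ⊢; omega
    · rw [ege]; push_cast [hgl, hfe] at ige ⊢; omega

-- upward-closed predicates on a descending-sorted list count a prefix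
theorem sorted_desc_count (p : Int → Bool)
    (hmono : ∀ v w : Int, v ≤ w → p v = true → p w = true) :
    ∀ (s : List Int), s.Pairwise (fun a b => b ≤ a) →
      ∀ j (hj : j < s.length), (p s[j] = true ↔ j < s.countP p) := by
  intro s
  induction s with
  | nil => intro _ j hj; simp at hj
  | cons a tl ih =>
    intro hs j hj
    rcases List.pairwise_cons.1 hs with ⟨ha, htl⟩
    have hzero : p a = false → tl.countP p = 0 := by
      intro hpa
      refine List.countP_eq_zero.2 ?_
      intro b hb hpb
      have := hmono b a (ha b hb) hpb
      simp [this] at hpa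
    cases j with
    | zero =>
      by_cases hpa : p a
      · simp [List.countP_cons, hpa]
      · have h0 := hzero (Bool.eq_false_iff.2 hpa)
        simp [List.countP_cons, hpa, h0]
    | succ j =>
      have hj' : j < tl.length := by simpa using hj
      have hih := ih htl j hj'
      by_cases hpa : p a
      · have hcount : (a :: tl).countP p = tl.countP p + 1 := by
          simp [List.countP_cons, hpa]
        simp only [hcount, List.getElem_cons_succ]
        constructor
        · intro h; have := hih.1 h; omega
        · intro h; exact hih.2 (by omega)
      · have h0 := hzero (Bool.eq_false_iff.2 hpa)
        have hb : p tl[j] = false := by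
          refine Bool.eq_false_iff.2 (fun hpb => ?_)
          have := hmono tl[j] a (ha _ (List.getElem_mem hj')) hpb
          exact hpa this
        simp [List.countP_cons, hpa, h0, hb]

theorem rank_unique (xs : List Int) (k t1 t2 : Int)
    (ha1 : (cgt t1 xs : Int) < k) (ha2 : k ≤ (cge t1 xs : Int))
    (hb1 : (cgt t2 xs : Int) < k) (hb2 : k ≤ (cge t2 xs : Int)) : t1 = t2 := by
  rcases lt_trichotomy t1 t2 with h | h | h
  · exfalso
    have hmono : cge t2 xs ≤ cgt t1 xs := by
      refine List.countP_mono_left (fun a _ hpa => ?_)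
      simp only [decide_eq_true_eq] at hpa ⊢
      omega
    omega
  · exact h
  · exfalso
    have hmono : cge t1 xs ≤ cgt t2 xs := by
      refine List.countP_mono_left (fun a _ hpa => ?_)
      simp only [decide_eq_true_eq] at hpa ⊢
      omega
    omega

-- A's loop: exhausts in phase 1 when y ≥ len
theorem loop_all (s : List Int) (y : Int) (hny : (s.length : Int) ≤ y) :
    ∀ j (aux : Option Int), j ≤ s.length →
      fase1Loop s y j (j : Int) aux = (s.length : Int) := by
  have H : ∀ m j (aux : Option Int), s.length - j = m → j ≤ s.length →
      fase1Loop s y j (j : Int) aux = (s.length : Int) := by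
    intro m
    induction m with
    | zero =>
      intro j aux hm hj
      have hj' : j = s.length := by omega
      rw [fase1Loop, dif_neg (by omega)]
      exact_mod_cast congrArg (Nat.cast : Nat → Int) hj'
    | succ m ih =>
      intro j aux hm hj
      have hlt : j < s.length := by omega
      have hy : (j : Int) < y := by
        have : (j : Int) < (s.length : Int) := by exact_mod_cast hlt
        omega
      rw [fase1Loop, dif_pos hlt, if_pos hy]
      have hcast : (j : Int) + 1 = ((j + 1 : Nat) : Int) := by push_cast; ring
      by_cases hq : (j : Int) + 1 = y
      · rw [if_pos hq, hcast]; exact ih (j + 1) _ (by omega) (by omega)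
      · rw [if_neg hq, hcast]; exact ih (j + 1) aux (by omega) (by omega)
  exact fun j aux hj => H (s.length - j) j aux rfl hj

-- A's loop: phase 1 reaches cont = k with aux = s[k-1]
theorem loop_phase1 (s : List Int) (k : Nat) (hk : k ≤ s.length) (hk1 : 1 ≤ k) :
    ∀ j (aux : Option Int), j < k →
      fase1Loop s (k : Int) j (j : Int) aux
        = fase1Loop s (k : Int) k (k : Int) (some (s[k-1]'(by omega))) := by
  have H : ∀ m j (aux : Option Int), k - j = m → j < k →
      fase1Loop s (k : Int) j (j : Int) aux
        = fase1Loop s (k : Int) k (k : Int) (some (s[k-1]'(by omega))) := by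
    intro m
    induction m with
    | zero => intro j aux hm hj; omega
    | succ m ih =>
      intro j aux hm hj
      have hlt : j < s.length := by omega
      have hy : (j : Int) < (k : Int) := by exact_mod_cast hj
      rw [fase1Loop, dif_pos hlt, if_pos hy]
      have hcast : (j : Int) + 1 = ((j + 1 : Nat) : Int) := by push_cast; ring
      by_cases hq : (j : Int) + 1 = (k : Int)
      · have hjk : j + 1 = k := by exact_mod_cast hq
        have hj1 : j = k - 1 := by omega
        rw [if_pos hq, hcast]
        subst hj1
        rw [show (k - 1 + 1 : Nat) = k from by omega]
      · have hjk : j + 1 < k := by omega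
        rw [if_neg hq, hcast]
        exact ih (j + 1) aux (by omega) hjk
  exact fun j aux hj => H (k - j) j aux rfl hj

-- A's loop: phase 2 stops exactly at the count of elements ≥ t
theorem loop_phase2 (s : List Int) (k : Nat) (t : Int)
    (hs : s.Pairwise (fun a b => b ≤ a)) (hk : k - 1 < s.length) (hk1 : 1 ≤ k)
    (ht : t = s[k-1]'hk) :
    ∀ j, k ≤ j → j ≤ cge t s →
      fase1Loop s (k : Int) j (j : Int) (some t) = (cge t s : Int) := by
  have hcle : cge t s ≤ s.length := by unfold cge; exact List.countP_le_length
  have hcount := sorted_desc_count (fun v => decide (t ≤ v))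
    (fun v w hvw hv => by simp only [decide_eq_true_eq] at hv ⊢; omega) s hs
  simp only [show List.countP (fun v => decide (t ≤ v)) s = cge t s from rfl] at hcount
  have hle : ∀ j (hj : j < s.length), k ≤ j + 1 → s[j] ≤ t := by
    intro j hj hkj
    rcases Nat.lt_or_ge (k - 1) j with h | h
    · have := (List.pairwise_iff_getElem.1 hs) (k - 1) j hk hj h
      omega
    · have hj1 : j = k - 1 := by omega
      subst hj1; omega
  have H : ∀ m j, cge t s - j = m → k ≤ j → j ≤ cge t s →
      fase1Loop s (k : Int) j (j : Int) (some t) = (cge t s : Int) := by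
    intro m
    induction m with
    | zero =>
      intro j hm hkj hjc
      have hj : j = cge t s := by omega
      rw [fase1Loop]
      rcases Nat.lt_or_ge j s.length with hlt | hge
      · have hyn : ¬ ((j : Int) < (k : Int)) := by
          have : (k : Int) ≤ (j : Int) := by exact_mod_cast hkj
          omega
        have hsj : ¬ (t ≤ s[j]) := by
          intro hts
          have := (hcount j hlt).1 (by simpa using hts)
          omega
        rw [dif_pos hlt, if_neg hyn,
          if_neg (fun h => hsj (le_of_eq (Option.some.inj h)))]
        exact_mod_cast congrArg (Nat.cast : Nat → Int) hj
      · rw [dif_neg (by omega)]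
        exact_mod_cast congrArg (Nat.cast : Nat → Int) hj
    | succ m ih =>
      intro j hm hkj hjc
      have hjc' : j < cge t s := by omega
      have hlt : j < s.length := by omega
      have hyn : ¬ ((j : Int) < (k : Int)) := by
        have : (k : Int) ≤ (j : Int) := by exact_mod_cast hkj
        omega
      have hts : t ≤ s[j] := by
        have := (hcount j hlt).2 hjc'
        simpa using this
      have hst : s[j] ≤ t := hle j hlt (by omega)
      have hsj : s[j] = t := le_antisymm hst hts
      rw [fase1Loop, dif_pos hlt, if_neg hyn, if_pos (by rw [hsj])]
      have hcast : (j : Int) + 1 = ((j + 1 : Nat) : Int) := by push_cast; ring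
      rw [hcast]
      exact ih (j + 1) (by omega) (by omega) (by omega)
  exact fun j hkj hjc => H (cge t s - j) j rfl hkj hjc

-- ===== VERDICT (by name: the statement is the Claim_ definition above) =====
theorem fase1_spec : Claim_equal_fase1 := by
  intro l _ hpre
  obtain ⟨hlen, hy1⟩ := hpre
  have h1l : 1 < l.length := by omega
  unfold Spec_fase1
  simp only [fase1, fase1_alt]
  have hY : PySem.List.pyGetD l 1 0 = l.getD 1 0 := by
    have h2 := PySem.List.pyGetD_eq_getElem l (d := 0) (i := 1) (by norm_num)
      (by exact_mod_cast h1l)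
    rw [h2, List.getD_eq_getElem l 0 h1l]
    simp
  rw [hY]
  set Y := l.getD 1 0 with hYdef
  have hdd : (l.drop 1).drop 1 = l.drop 2 := by
    rw [List.drop_drop]
  rw [hdd]
  set rest := l.drop 2 with hrest
  set s0 := PySem.List.sorted rest (fun x => x) false with hs0
  set s := s0.reverse with hsdef
  have hperm : s.Perm rest := (s0.reverse_perm).trans (PySem.List.sorted_perm _ _ _)
  have hpair : s.Pairwise (fun a b => b ≤ a) := by
    rw [hsdef, List.pairwise_reverse]
    exact PySem.List.sorted_pairwise rest (fun x => x) 
  have hlen_s : s.length = rest.length := by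
    rw [hsdef, List.length_reverse, hs0, PySem.List.length_sorted]
  by_cases hyn : (rest.length : Int) ≤ Y
  · rw [if_pos hyn]
    have := loop_all s Y (by rw [hlen_s]; exact hyn) 0 none (by omega)
    simpa [hlen_s] using this
  · rw [if_neg hyn]
    set k := Y.toNat with hkdef
    have hy_eq : Y = (k : Int) := (Int.toNat_of_nonneg (by omega)).symm
    have hk1 : 1 ≤ k := by omega
    have hkn : k < rest.length := by omega
    have hks : k ≤ s.length := by omega
    have hk1s : k - 1 < s.length := by omega
    -- A side
    have hA1 := loop_phase1 s k hks hk1 0 none (by omega)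
    set t' := s[k-1]'hk1s with ht'def
    have hcount := sorted_desc_count (fun v => decide (t' ≤ v))
      (fun v w hvw hv => by simp only [decide_eq_true_eq] at hv ⊢; omega) s hpair
    have hge' : k ≤ cge t' s := by
      have := (hcount (k-1) hk1s).1 (by simp [ht'def])
      unfold cge; omega
    have hgt' : (cgt t' s : Int) < (k : Int) := by
      have hcount2 := sorted_desc_count (fun v => decide (t' < v))
        (fun v w hvw hv => by simp only [decide_eq_true_eq] at hv ⊢; omega) s hpair
      by_contra hc
      have hkc : k ≤ List.countP (fun v => decide (t' < v)) s := by
        unfold cgt at hc; omega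
      have := (hcount2 (k-1) hk1s).2 (by omega)
      simp at this
      rw [ht'def] at this
      exact lt_irrefl _ this
    have hA2 := loop_phase2 s k t' hpair hk1s hk1 rfl k (le_refl k) hge'
    have hA : fase1Loop s Y 0 0 none = (cge t' s : Int) := by
      rw [hy_eq]
      have h00 : ((0 : Nat) : Int) = (0 : Int) := rfl
      rw [← h00, hA1, hA2]
    -- B side
    have hYlen : Y ≤ (rest.length : Int) := by omega
    obtain ⟨bgt, bge, bmem⟩ := kthLargest_spec rest Y (by omega) hYlen
    set t := kthLargest rest Y with htdef
    have ecge : ∀ u : Int, cge u s = cge u rest := fun u => hperm.countP_eq _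
    have ecgt : ∀ u : Int, cgt u s = cgt u rest := fun u => hperm.countP_eq _
    have hteq : t = t' := by
      refine rank_unique rest Y t t' bgt bge ?_ ?_
      · rw [← ecgt t']; omega
      · rw [← ecge t']; omega
    have hB : rest.foldl (fun c v => if t ≤ v then c + 1 else c) (0 : Int)
        = (cge t rest : Int) := by
      rw [foldl_count_pred (fun v => t ≤ v) rest 0]
      unfold cge; omega
    rw [hA, hB, hteq, ecge t']
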